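-- pv_equiv track=rewrite | github.com/andreev-g/iu8-decision-theory | lab_2/main.py | to_canonical
-- ===== SOURCE A (Python) =====
-- def to_canonical(c, A, b):
--     """
--     :param c: коэффициенты при линейной комбинации ЦФ
--     :param A: матрица ограничений
--     :param b: вектор ограничений
--     """
--     # вычисляем количество фиктивных переменных
--     fictious_vars = len(A)
--
--     # переводим коэффициенты при линейной комбинации ЦФ в канонический вид
--     # также добавляем нулевые коэффициенты при фиктивных переменных
--     canonical_c = []
--     for ci in c:
--         canonical_c.append(-ci)
--     for _ in range(0, fictious_vars):
--         canonical_c.append(0)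
--
--     # переводим матрицу ограничений в канонический вид
--     canonical_A = []
--     for i in range(0, len(A)):
--         # формирование строк
--         canonical_A.append([])
--
--         # копирование коффициентов для реальных переменных
--         for j in range(0, len(A[i])):
--             canonical_A[i].append(A[i][j])
--         # создание коффициентов для фиктивных переменных
--         for k in range(0, fictious_vars):
--             if k == i:
--                 canonical_A[i].append(1)
--             else:
--                 canonical_A[i].append(0)
--
--     return canonical_c, canonical_A, b
-- ===== SOURCE B (Python) =====
-- def to_canonical(c, A, b):
--     """
--     :param c: коэффициенты при линейной комбинации ЦФ
--     :param A: матрица ограничений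
--     :param b: вектор ограничений
--     """
--     def identity(m):
--         # m x m identity matrix, built recursively: first row [1,0,...,0],
--         # below it the (m-1)-identity with a zero column prepended
--         if m == 0:
--             return []
--         return [[1] + [0] * (m - 1)] + [[0] + r for r in identity(m - 1)]
--
--     m = len(A)
--     canonical_c = [-ci for ci in c] + [0] * m
--     canonical_A = [row + e for row, e in zip(A, identity(m))]
--     return canonical_c, canonical_A, b
-- ===== Notes on version B (the rewrite author's own statement) =====
-- stated objective: alternative
-- what changed: Instead of A's per-element loops with a k==i conditional building each slack entry, B constructs the whole slack block as an identity matrix by structural recursion (first unit row, then the smaller identity with a zero column prepended) and zips it row-wise onto A.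
import Mathlib
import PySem

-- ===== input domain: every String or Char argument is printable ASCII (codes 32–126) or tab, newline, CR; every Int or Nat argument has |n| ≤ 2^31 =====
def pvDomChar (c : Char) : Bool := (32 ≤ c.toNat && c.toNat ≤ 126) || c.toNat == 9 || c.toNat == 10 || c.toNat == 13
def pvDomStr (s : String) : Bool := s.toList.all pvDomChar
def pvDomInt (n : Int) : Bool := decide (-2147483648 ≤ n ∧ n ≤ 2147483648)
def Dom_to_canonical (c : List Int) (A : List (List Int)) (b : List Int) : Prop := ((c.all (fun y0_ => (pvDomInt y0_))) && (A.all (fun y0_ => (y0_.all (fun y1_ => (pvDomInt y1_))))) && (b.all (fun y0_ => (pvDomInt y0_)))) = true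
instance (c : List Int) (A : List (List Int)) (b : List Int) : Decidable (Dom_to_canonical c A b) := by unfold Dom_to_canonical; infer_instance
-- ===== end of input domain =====

-- B replaces A's per-element slack loops (with a k==i conditional) by a recursively built
-- identity matrix zipped row-wise onto A; objective: alternative (same cost, different construction).

-- ===== PORT A =====
def to_canonical (c : List Int) (A : List (List Int)) (b : List Int) : List Int × List (List Int) × List Int :=
  let fictious_vars : Int := A.length
  let canonical_c := c.foldl (fun acc ci => acc ++ [-ci]) []
  let canonical_c := (PySem.List.pyRange 0 fictious_vars 1).foldl
      (fun acc _ => acc ++ [(0 : Int)]) canonical_c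
  let canonical_A := (PySem.List.pyRange 0 (A.length : Int) 1).foldl
      (fun M i =>
        -- canonical_A.append([]) followed by in-place appends to canonical_A[i]
        let Ai := PySem.List.pyGetD A i []
        let row : List Int := []
        let row := (PySem.List.pyRange 0 (Ai.length : Int) 1).foldl
            (fun r j => r ++ [PySem.List.pyGetD Ai j 0]) row
        let row := (PySem.List.pyRange 0 fictious_vars 1).foldl
            (fun r k => if k == i then r ++ [(1 : Int)] else r ++ [(0 : Int)]) row
        M ++ [row]) []
  (canonical_c, canonical_A, b)

-- ===== PORT B =====
-- identity(m): first the unit row, then the smaller identity with a zero column prepended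
def pvIdentity : Nat → List (List Int)
  | 0 => []
  | m + 1 => ([1] ++ List.replicate m 0) :: (pvIdentity m).map (fun r => 0 :: r)

def to_canonical_alt (c : List Int) (A : List (List Int)) (b : List Int) : List Int × List (List Int) × List Int :=
  let m := A.length
  let canonical_c := c.map (fun ci => -ci) ++ List.replicate m (0 : Int)
  let canonical_A := (A.zip (pvIdentity m)).map (fun p => p.1 ++ p.2)
  (canonical_c, canonical_A, b)

-- ===== PRECONDITION & SPEC =====
def Spec_to_canonical (c : List Int) (A : List (List Int)) (b : List Int) (out : List Int × List (List Int) × List Int) : Prop := out = to_canonical_alt c A b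
instance (c : List Int) (A : List (List Int)) (b : List Int) (out : List Int × List (List Int) × List Int) : Decidable (Spec_to_canonical c A b out) := by unfold Spec_to_canonical; infer_instance

-- ===== CLAIM (what is proved, stated in full; the proofs are below) =====
def Claim_equal_to_canonical : Prop := ∀ (c : List Int) (A : List (List Int)) (b : List Int), Dom_to_canonical c A b → Spec_to_canonical c A b (to_canonical c A b)

-- ===== LEMMAS AND PROOFS =====

lemma pvIdentity_length (m : Nat) : (pvIdentity m).length = m := by
  induction m with
  | zero => rfl
  | succ m ih => simp [pvIdentity, ih]

-- row j of the identity matrix is the j-th indicator row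
lemma pvIdentity_getElem (m j : Nat) (h : j < m) :
    (pvIdentity m)[j]'(by simpa [pvIdentity_length] using h) =
      (List.range m).map (fun k => if k = j then (1 : Int) else 0) := by
  induction m generalizing j with
  | zero => omega
  | succ m ih =>
      cases j with
      | zero =>
          simp [pvIdentity, List.range_succ_eq_map, List.map_map, Function.comp_def,
            List.map_const']
      | succ j =>
          have hj : j < m := by omega
          have : (pvIdentity (m+1))[j+1]'(by simpa [pvIdentity_length] using h) =
              (0 : Int) :: (pvIdentity m)[j]'(by simpa [pvIdentity_length] using hj) := by
            simp [pvIdentity]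
          rw [this, ih j hj]
          simp [List.range_succ_eq_map, List.map_map, Function.comp_def]

theorem to_canonical_spec : Claim_equal_to_canonical := by
  intro c A b _
  unfold Spec_to_canonical to_canonical to_canonical_alt
  simp only [PySem.List.foldl_append_singleton_eq_map, List.nil_append]
  refine Prod.ext ?_ (Prod.ext ?_ rfl)
  · -- objective coefficients
    simp [List.map_const', PySem.List.length_pyRange_one]
  · -- constraint matrix
    apply List.ext_getElem
    · simp [PySem.List.length_pyRange_one, pvIdentity_length]
    intro j h1 h2
    have hj : j < A.length := by
      simpa [PySem.List.length_pyRange_one] using h1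
    simp only [List.getElem_map, PySem.List.getElem_pyRange_one, List.getElem_zip]
    have hAj : PySem.List.pyGetD A (0 + (j : Int)) [] = A[j] := by
      rw [PySem.List.pyGetD_of_nonneg] <;> simp [hj]
    rw [hAj, PySem.List.map_pyGetD_pyRange_zero']
    have hbody : (fun (r : List Int) (k : Int) =>
          if k == (0 + (j : Int)) then r ++ [(1 : Int)] else r ++ [(0 : Int)])
        = fun r k => r ++ [if k == ((j : Nat) : Int) then (1 : Int) else 0] := by
      funext r k
      by_cases h : k == (0 + (j : Int)) <;> simp_all
    rw [hbody, PySem.List.foldl_append_singleton_eq_map]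
    congr 1
    rw [pvIdentity_getElem A.length j hj]
    apply List.ext_getElem
    · simp [PySem.List.length_pyRange_one]
    intro k hk1 hk2
    simp only [List.getElem_map, PySem.List.getElem_pyRange_one, List.getElem_range]
    have hk : k < A.length := by simpa [PySem.List.length_pyRange_one] using hk1
    by_cases hkj : k = j
    · subst hkj; simp
    · simp [hkj]
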